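-- pv_equiv track=rewrite | github.com/tcbegley/advent-of-code | 2017/day20.py | part_1
-- ===== SOURCE A (Python) =====
-- def l1(x):
--     return sum(map(abs, x))
--
-- class Particle:
--     def __init__(self, p, v, a):
--         self.p = p
--         self.v = v
--         self.a = a
--
--     def update(self):
--         self.v = [v + a for v, a in zip(self.v, self.a)]
--         self.p = [p + v for p, v in zip(self.p, self.v)]
--
--     def distance(self):
--         return l1(self.p)
--
-- def part_1(particles):
--     particles = [
--         (i, Particle(*particle)) for i, particle in enumerate(particles)
--     ]
--
--     min_l1_a = min(l1(p.a) for _, p in particles)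
--     nearest = [(i, p) for i, p in particles if l1(p.a) == min_l1_a]
--
--     min_l1_v = min(l1(p.v) for _, p in nearest)
--     nearest = [(i, p) for i, p in nearest if l1(p.v) == min_l1_v]
--
--     return nearest[0][0]
-- ===== SOURCE B (Python) =====
-- def part_1(particles):
--     best = None
--     for i, (p, v, a) in enumerate(particles):
--         key = (sum(map(abs, a)), sum(map(abs, v)))
--         if best is None or key < best[0]:
--             best = (key, i)
--     return best[1]
-- ===== Notes on version B (the rewrite author's own statement) =====
-- stated objective: simpler
-- what changed: Replaced A's four-pass body (min of L1 accelerations, filter, min of L1 velocities, filter, take first) by a single left-to-right pass keeping the best (lexicographic (l1(a), l1(v)) key, index) pair, replaced only on strictly smaller key so first-occurrence tie-breaking is preserved.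
import Mathlib
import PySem

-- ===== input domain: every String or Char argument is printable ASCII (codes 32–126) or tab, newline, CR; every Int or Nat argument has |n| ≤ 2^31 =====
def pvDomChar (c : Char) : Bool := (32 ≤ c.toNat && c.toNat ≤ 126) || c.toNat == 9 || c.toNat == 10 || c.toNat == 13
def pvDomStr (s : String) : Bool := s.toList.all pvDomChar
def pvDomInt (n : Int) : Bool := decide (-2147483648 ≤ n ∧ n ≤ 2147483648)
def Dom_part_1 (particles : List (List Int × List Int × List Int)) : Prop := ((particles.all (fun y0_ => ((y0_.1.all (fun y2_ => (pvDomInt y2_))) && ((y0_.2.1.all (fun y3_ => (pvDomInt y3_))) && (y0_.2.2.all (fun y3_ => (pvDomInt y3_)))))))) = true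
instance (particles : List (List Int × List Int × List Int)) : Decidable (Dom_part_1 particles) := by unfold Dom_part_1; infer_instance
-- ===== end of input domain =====

-- B is a single pass keeping the best (lexicographic (l1 a, l1 v) key, index) pair instead of
-- A's four passes (min, filter, min, filter, head); same result, simpler decomposition.

-- ===== PORT A =====
def l1 (x : List Int) : Int := (x.map (fun v => |v|)).sum

def part_1 (particles : List (List Int × List Int × List Int)) : Int :=
  let ps := PySem.List.enumerate particles
  match PySem.List.min? (ps.map (fun ip => l1 ip.2.2.2)) (fun v => v) with
  | none => 0      -- min() of an empty generator: ValueError, excluded by Pre_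
  | some minA =>
    let nearest := ps.filter (fun ip => l1 ip.2.2.2 == minA)
    match PySem.List.min? (nearest.map (fun ip => l1 ip.2.2.1)) (fun v => v) with
    | none => 0    -- unreachable: nearest is nonempty
    | some minV =>
      let nearest2 := nearest.filter (fun ip => l1 ip.2.2.1 == minV)
      match PySem.List.pyGet? nearest2 0 with
      | some x => x.1
      | none => 0  -- unreachable: nearest2 is nonempty

-- ===== PORT B =====
-- Python tuple '<' on pairs of ints is lexicographic:
def lexlt (x y : Int × Int) : Bool := decide (x.1 < y.1 ∨ (x.1 = y.1 ∧ x.2 < y.2))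

-- the loop body of Source B ('key = (sum(map(abs, a)), sum(map(abs, v))); if best is None or key < best[0]: best = (key, i)')
def bstep (best : Option ((Int × Int) × Int)) (ip : Int × (List Int × List Int × List Int)) :
    Option ((Int × Int) × Int) :=
  let key := ((ip.2.2.2.map (fun v => |v|)).sum, (ip.2.2.1.map (fun v => |v|)).sum)
  match best with
  | none => some (key, ip.1)
  | some b => if lexlt key b.1 then some (key, ip.1) else some b

def part_1_alt (particles : List (List Int × List Int × List Int)) : Int :=
  match (PySem.List.enumerate particles).foldl bstep none with
  | some b => b.2
  | none => 0      -- empty input: Source B raises TypeError, excluded by Pre_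

-- ===== PRECONDITION & SPEC =====
-- A raises ValueError (min of empty sequence) on the empty list; B raises TypeError there.
def Pre_part_1 (particles : List (List Int × List Int × List Int)) : Prop := particles ≠ []
instance (particles : List (List Int × List Int × List Int)) : Decidable (Pre_part_1 particles) := by unfold Pre_part_1; infer_instance
def pvWitness_part_1 : (List (List Int × List Int × List Int)) := [([1], [2], [3]), ([0], [0], [0])]

def Spec_part_1 (particles : List (List Int × List Int × List Int)) (out : Int) : Prop := out = part_1_alt particles
instance (particles : List (List Int × List Int × List Int)) (out : Int) : Decidable (Spec_part_1 particles out) := by unfold Spec_part_1; infer_instance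

-- ===== CLAIM (what is proved, stated in full; the proofs are below) =====
def Claim_equal_part_1 : Prop := ∀ (particles : List (List Int × List Int × List Int)), Dom_part_1 particles → Pre_part_1 particles → Spec_part_1 particles (part_1 particles)

-- ===== LEMMAS AND PROOFS =====

-- the (l1 a, l1 v) key of an enumerated particle
def pkey (ip : Int × (List Int × List Int × List Int)) : Int × Int :=
  (l1 ip.2.2.2, l1 ip.2.2.1)

-- leftmost element with lexicographically minimal key (proof-only reference function)
def pick : List (Int × (List Int × List Int × List Int)) → Option (Int × (List Int × List Int × List Int))
  | [] => none
  | x :: xs =>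
    match pick xs with
    | none => some x
    | some b => if lexlt (pkey b) (pkey x) then some b else some x

theorem pick_eq_none_iff (L : List (Int × (List Int × List Int × List Int))) :
    pick L = none ↔ L = [] := by
  cases L with
  | nil => simp [pick]
  | cons x xs => simp [pick]; cases h : pick xs <;> simp <;> split <;> simp

theorem lexlt_arith (x y : Int × Int) :
    lexlt x y = true ↔ (x.1 < y.1 ∨ (x.1 = y.1 ∧ x.2 < y.2)) := by
  simp [lexlt]

theorem lexlt_false (x y : Int × Int) :
    lexlt x y = false ↔ ¬ (x.1 < y.1 ∨ (x.1 = y.1 ∧ x.2 < y.2)) := by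
  simp [lexlt]

-- pick L returns an element of L whose key is minimal, with all strictly earlier
-- elements having strictly larger key
theorem pick_spec (L : List (Int × (List Int × List Int × List Int)))
    (m : Int × (List Int × List Int × List Int)) (h : pick L = some m) :
    ∃ L1 L2, L = L1 ++ m :: L2 ∧ (∀ y ∈ L1, lexlt (pkey m) (pkey y) = true) ∧
      (∀ y ∈ L, lexlt (pkey y) (pkey m) = false) := by
  induction L generalizing m with
  | nil => simp [pick] at h
  | cons x xs ih =>
    simp only [pick] at h
    cases hp : pick xs with
    | none =>
      rw [hp] at h
      have hxs : xs = [] := (pick_eq_none_iff xs).mp hp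
      subst hxs
      simp at h; subst h
      exact ⟨[], [], by simp, by simp, by simp [lexlt_false]⟩
    | some b =>
      rw [hp] at h
      have h' : (if lexlt (pkey b) (pkey x) then some b else some x) = some m := h
      obtain ⟨L1, L2, hdec, hbefore, hmin⟩ := ih b hp
      by_cases hlt : lexlt (pkey b) (pkey x) = true
      · rw [if_pos hlt] at h'
        simp at h'; subst h'
        refine ⟨x :: L1, L2, by simp [hdec], ?_, ?_⟩
        · intro y hy
          rcases List.mem_cons.mp hy with rfl | hy
          · exact hlt
          · exact hbefore y hy
        · intro y hy
          rcases List.mem_cons.mp hy with rfl | hy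
          · -- ¬ lexlt x m given lexlt m x (asymmetry)
            simp [lexlt_arith, lexlt_false] at hlt ⊢; omega
          · exact hmin y (hdec ▸ hy)
      · rw [if_neg hlt] at h'
        simp at h'; subst h'
        refine ⟨[], xs, by simp, by simp, ?_⟩
        intro y hy
        rcases List.mem_cons.mp hy with rfl | hy
        · simp [lexlt_false]
        · have h1 := hmin y (hdec ▸ hy)
          simp [lexlt_arith, lexlt_false] at h1 hlt ⊢
          omega

-- the fold of Source B computes the (key, index) of the leftmost-minimal element
theorem fold_pick (L : List (Int × (List Int × List Int × List Int)))
    (b : (Int × Int) × Int) :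
    L.foldl bstep (some b) =
      some (match pick L with
            | none => b
            | some m => if lexlt (pkey m) b.1 then (pkey m, m.1) else b) := by
  induction L generalizing b with
  | nil => simp [pick]
  | cons x xs ih =>
    have hstep : bstep (some b) x =
        some (if lexlt (pkey x) b.1 then (pkey x, x.1) else b) := by
      simp only [bstep, pkey, l1]
      split <;> simp_all
    simp only [List.foldl_cons, hstep]
    rw [ih]
    simp only [pick]
    cases hp : pick xs with
    | none => simp
    | some m =>
      simp only []
      by_cases h1 : lexlt (pkey m) (pkey x) = true <;>
        by_cases h2 : lexlt (pkey x) b.1 = true <;>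
          by_cases h3 : lexlt (pkey m) b.1 = true <;>
            simp [h1, h2, h3] <;>
              (simp [lexlt_arith, lexlt_false] at h1 h2 h3 ⊢ <;> omega)

theorem min_eq_of_mem_isMin (L : List (Int × (List Int × List Int × List Int)))
    (f : (Int × (List Int × List Int × List Int)) → Int)
    (m : Int × (List Int × List Int × List Int)) (hm : m ∈ L)
    (hmin : ∀ y ∈ L, f m ≤ f y) :
    PySem.List.min? (L.map f) (fun v => v) = some (f m) := by
  cases hq : PySem.List.min? (L.map f) (fun v => v) with
  | none =>
    rw [PySem.List.min?_eq_none_iff] at hq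
    simp at hq
    subst hq; simp at hm
  | some q =>
    have hqmem := PySem.List.min?_mem hq
    have hqmin := PySem.List.min?_isMin hq
    obtain ⟨y, hy, rfl⟩ := List.mem_map.mp hqmem
    have h1 : f m ≤ f y := hmin y hy
    have h2 : f y ≤ f m := hqmin (f m) (List.mem_map.mpr ⟨m, hm, rfl⟩)
    simp [le_antisymm h1 h2]

-- ===== VERDICT (by name: the statement is the Claim_ definition above) =====
theorem part_1_spec : Claim_equal_part_1 := by
  intro particles _ hpre
  unfold Spec_part_1
  set L := PySem.List.enumerate particles with hL
  have hLne : L ≠ [] := by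
    intro h
    apply hpre
    have := congrArg List.length h
    simpa [hL, PySem.List.length_enumerate] using this
  -- pick L is some m
  cases hpk : pick L with
  | none => exact absurd ((pick_eq_none_iff L).mp hpk) hLne
  | some m =>
    obtain ⟨L1, L2, hdec, hbefore, hmin⟩ := pick_spec L m hpk
    have hmem : m ∈ L := by rw [hdec]; simp
    -- notation for the two key projections
    set f : (Int × (List Int × List Int × List Int)) → Int := fun ip => l1 ip.2.2.2 with hf
    set g : (Int × (List Int × List Int × List Int)) → Int := fun ip => l1 ip.2.2.1 with hg
    have hfmin : ∀ y ∈ L, f m ≤ f y := by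
      intro y hy
      have := hmin y hy
      simp [lexlt_arith, lexlt_false, pkey, hf] at this ⊢
      omega
    -- B side
    have hB : part_1_alt particles = m.1 := by
      unfold part_1_alt
      rw [← hL]
      cases hLc : L with
      | nil => exact absurd hLc hLne
      | cons e es =>
        have hstep : bstep none e = some (pkey e, e.1) := by
          simp [bstep, pkey, l1]
        rw [List.foldl_cons, hstep, fold_pick]
        have hpk' : pick (e :: es) = some m := hLc ▸ hpk
        simp only [pick] at hpk'
        cases hpe : pick es with
        | none =>
          rw [hpe] at hpk'
          simp at hpk'; subst hpk'; simp
        | some b =>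
          rw [hpe] at hpk'
          have hpk'' : (if lexlt (pkey b) (pkey e) then some b else some e) = some m := hpk'
          by_cases hlt : lexlt (pkey b) (pkey e) = true
          · rw [if_pos hlt] at hpk''
            simp at hpk''; subst hpk''
            simp [hpe, hlt]
          · rw [if_neg hlt] at hpk''
            simp at hpk''; subst hpk''
            simp [hpe, hlt]
    -- A side
    have hminA : PySem.List.min? (L.map f) (fun v => v) = some (f m) :=
      min_eq_of_mem_isMin L f m hmem hfmin
    set nearest := L.filter (fun ip => f ip == f m) with hnear
    have hmn : m ∈ nearest := by
      rw [hnear]; exact List.mem_filter.mpr ⟨hmem, by simp⟩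
    have hgmin : ∀ y ∈ nearest, g m ≤ g y := by
      intro y hy
      obtain ⟨hyL, hyf⟩ := List.mem_filter.mp (hnear ▸ hy)
      have := hmin y hyL
      simp [lexlt_arith, lexlt_false, pkey, hf, hg] at this hyf ⊢
      omega
    have hminV : PySem.List.min? (nearest.map g) (fun v => v) = some (g m) :=
      min_eq_of_mem_isMin nearest g m hmn hgmin
    have hfilter2 : nearest.filter (fun ip => g ip == g m) =
        (L1.filter (fun ip => (g ip == g m) && (f ip == f m))) ++
          m :: (L2.filter (fun ip => (g ip == g m) && (f ip == f m))) := by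
      rw [hnear, List.filter_filter, hdec]
      simp [List.filter_append]
    have hL1nil : L1.filter (fun ip => (g ip == g m) && (f ip == f m)) = [] := by
      rw [List.filter_eq_nil_iff]
      intro y hy
      have := hbefore y hy
      simp [lexlt_arith, lexlt_false, pkey, hf, hg] at this ⊢
      omega
    unfold part_1
    rw [← hL]
    simp only [← hf, ← hg]
    rw [hminA]
    simp only []
    rw [← hnear, hminV]
    simp only []
    rw [hfilter2, hL1nil]
    simp [PySem.List.pyGet?_zero_cons, hB]
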